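-- pv_equiv track=rewrite | github.com/xa8zz/erdos-harness | scripts/test_cp_extendibility.py | exact_matrix_nnz
-- ===== SOURCE A (Python) =====
-- import math
--
-- def positive_compositions(total: int, parts: int):
--     if parts == 1:
--         if total > 0:
--             yield (total,)
--         return
--     for first in range(1, total - parts + 2):
--         for rest in positive_compositions(total - first, parts - 1):
--             yield (first,) + rest
--
-- def exact_matrix_nnz(alphabet_size: int, Q: int) -> int:
--     total = 0
--     for support_size in range(1, min(Q, alphabet_size) + 1):
--         per_support = 0
--         for positive in positive_compositions(Q, support_size):
--             singles = sum(1 for value in positive if value == 1)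
--             per_support += support_size * support_size - singles + 1
--         total += math.comb(alphabet_size, support_size) * per_support
--     return total
-- ===== SOURCE B (Python) =====
-- import math
--
-- def exact_matrix_nnz(alphabet_size: int, Q: int) -> int:
--     # comp(t, p) = number of compositions of t into p positive parts
--     def comp(t, p):
--         if p == 0:
--             return 1 if t == 0 else 0
--         return math.comb(t - 1, p - 1) if t >= p else 0
--
--     total = 0
--     for k in range(1, min(Q, alphabet_size) + 1):
--         # per_support = sum over compositions of (k^2 + 1 - singles):
--         #   (k^2+1) * comp(Q, k)  minus  total number of parts equal to 1,
--         #   which by symmetry is k * comp(Q - 1, k - 1).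
--         per_support = (k * k + 1) * comp(Q, k) - k * comp(Q - 1, k - 1)
--         total += math.comb(alphabet_size, k) * per_support
--     return total
-- ===== Notes on version B (the rewrite author's own statement) =====
-- stated objective: faster
-- what changed: Replaces the recursive enumeration of all positive compositions of Q (each scanned for parts equal to 1) by the closed form per_support = (k^2+1)*C(Q-1,k-1) - k*C(Q-2,k-2): C(Q-1,k-1) counts the compositions and by symmetry k*C(Q-2,k-2) counts their parts equal to 1. Intended as faster; a timing run could not measure a ratio (A already timed out at n=16 where B returned, so no clean reading at a common largest size).
import Mathlib
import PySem

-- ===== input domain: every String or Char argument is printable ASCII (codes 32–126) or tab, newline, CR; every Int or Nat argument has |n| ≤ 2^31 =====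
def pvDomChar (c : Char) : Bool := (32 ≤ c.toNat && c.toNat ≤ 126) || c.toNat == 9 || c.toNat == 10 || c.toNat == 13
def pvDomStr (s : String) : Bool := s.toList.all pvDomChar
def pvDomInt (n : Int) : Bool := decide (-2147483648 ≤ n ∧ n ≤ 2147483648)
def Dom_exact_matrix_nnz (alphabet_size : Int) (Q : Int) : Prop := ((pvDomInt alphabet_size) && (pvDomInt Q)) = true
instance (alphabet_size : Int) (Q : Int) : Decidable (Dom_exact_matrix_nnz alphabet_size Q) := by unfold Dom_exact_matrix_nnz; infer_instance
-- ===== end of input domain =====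

-- B replaces A's enumeration of all positive compositions of Q by a closed binomial
-- formula per support size (objective: faster; intended as faster — a timing run
-- saw A time out at n=16 where B returned, but could not measure a ratio).

-- ===== PORT A =====
-- math.comb(n, k), ported as CPython computes it (exact multiplicative formula;
-- proved equal to Nat.choose in pvComb_eq_choose below)
def pvComb (n : Nat) (k : Nat) : Nat :=
  (List.range k).foldl (fun c i => c * (n - i) / (i + 1)) 1

-- parts = 0 is unreachable: A only calls positive_compositions with parts ≥ 1
-- (the Python generator would not terminate for parts ≤ 0).
def positive_compositions (total : Int) (parts : Nat) : List (List Int) :=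
  match parts with
  | 0 => []
  | 1 => if total > 0 then [[total]] else []
  | p + 2 =>
    (PySem.List.pyRange 1 (total - ((p : Int) + 2) + 2) 1).flatMap (fun first =>
      (positive_compositions (total - first) (p + 1)).map (fun rest => first :: rest))

def exact_matrix_nnz (alphabet_size : Int) (Q : Int) : Int :=
  (PySem.List.pyRange 1 (min Q alphabet_size + 1) 1).foldl (fun total support_size =>
    let per_support :=
      (positive_compositions Q support_size.toNat).foldl (fun per positive =>
        let singles : Int := ((positive.filter (fun v => v == 1)).length : Int)
        per + support_size * support_size - singles + 1) 0
    total + (pvComb alphabet_size.toNat support_size.toNat : Int) * per_support) 0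

-- ===== PORT B =====
-- number of compositions of t into p positive parts (Source B's helper comp)
def pvComp (t : Int) (p : Int) : Int :=
  if p = 0 then (if t = 0 then 1 else 0)
  else if t ≥ p then (pvComb (t - 1).toNat (p - 1).toNat : Int) else 0

def exact_matrix_nnz_alt (alphabet_size : Int) (Q : Int) : Int :=
  (PySem.List.pyRange 1 (min Q alphabet_size + 1) 1).foldl (fun total k =>
    total + (pvComb alphabet_size.toNat k.toNat : Int) *
      ((k * k + 1) * pvComp Q k - k * pvComp (Q - 1) (k - 1))) 0

-- ===== PRECONDITION & SPEC =====
def Spec_exact_matrix_nnz (alphabet_size : Int) (Q : Int) (out : Int) : Prop := out = exact_matrix_nnz_alt alphabet_size Q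
instance (alphabet_size : Int) (Q : Int) (out : Int) : Decidable (Spec_exact_matrix_nnz alphabet_size Q out) := by unfold Spec_exact_matrix_nnz; infer_instance

-- ===== CLAIM (what is proved, stated in full; the proofs are below) =====
def Claim_equal_exact_matrix_nnz : Prop := ∀ (alphabet_size : Int) (Q : Int), Dom_exact_matrix_nnz alphabet_size Q → Spec_exact_matrix_nnz alphabet_size Q (exact_matrix_nnz alphabet_size Q)

-- ===== LEMMAS AND PROOFS =====

theorem pvComb_eq_choose (n : Nat) : ∀ k : Nat, pvComb n k = n.choose k := by
  intro k
  induction k with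
  | zero => simp [pvComb]
  | succ k ih =>
    unfold pvComb at ih ⊢
    rw [List.range_succ, List.foldl_append, List.foldl_cons, List.foldl_nil, ih,
      ← Nat.choose_succ_right_eq, Nat.mul_div_cancel _ (Nat.succ_pos k)]

-- evaluation lemmas for pvComp
theorem pvComp_eval {t p : Int} (hp : 1 ≤ p) (h : p ≤ t) :
    pvComp t p = (Nat.choose (t - 1).toNat (p - 1).toNat : Int) := by
  unfold pvComp; split_ifs <;> first | rw [pvComb_eq_choose] | omega

theorem pvComp_zero_of_lt {t p : Int} (hp : 1 ≤ p) (h : t < p) : pvComp t p = 0 := by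
  unfold pvComp; split_ifs <;> first | rfl | omega

theorem pvComp_one (t : Int) : pvComp t 1 = if 1 ≤ t then 1 else 0 := by
  unfold pvComp; rw [pvComb_eq_choose]; split_ifs <;> simp_all <;> omega

theorem pvComp_zero_right (t : Int) : pvComp t 0 = if t = 0 then 1 else 0 := by
  unfold pvComp; simp

-- Pascal's rule, expressed on pvComp.
theorem pvComp_pascal (t k : Int) (hk : 0 ≤ k) :
    pvComp (t - 1) k + pvComp (t - 1) (k + 1) = pvComp t (k + 1) := by
  rcases eq_or_lt_of_le hk with hk0 | hk1
  · subst hk0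
    rw [pvComp_zero_right, zero_add, pvComp_one, pvComp_one]
    split_ifs <;> omega
  · by_cases h1 : t < k + 1
    · rw [pvComp_zero_of_lt (by omega) (by omega), pvComp_zero_of_lt (by omega) (by omega),
        pvComp_zero_of_lt (by omega) (by omega)]
      ring
    · by_cases h2 : t = k + 1
      · subst h2
        rw [pvComp_eval (by omega) (by omega), pvComp_zero_of_lt (by omega) (by omega),
          pvComp_eval (by omega) (by omega)]
        rw [show (k + 1 - 1 - 1).toNat = (k - 1).toNat by omega, Nat.choose_self, Nat.choose_self]
        simp
      · have h3 : k + 2 ≤ t := by omega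
        rw [pvComp_eval (by omega) (by omega), pvComp_eval (by omega) (by omega),
          pvComp_eval (by omega) (by omega)]
        rw [show (t - 1).toNat = (t - 1 - 1).toNat + 1 by omega,
          show (k + 1 - 1).toNat = (k - 1).toNat + 1 by omega]
        push_cast [Nat.choose_succ_succ]
        ring

-- Hockey-stick: summing pvComp (t-1-i) k for i < n gives pvComp t (k+1) once n covers t-k.
theorem pvComp_hs (n : Nat) : ∀ (t k : Int), 0 ≤ k → t - k ≤ (n : Int) →
    ((List.range n).map (fun (i : Nat) => pvComp (t - 1 - (i : Int)) k)).sum = pvComp t (k + 1) := by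
  induction n with
  | zero =>
    intro t k hk hn
    simp only [List.range_zero, List.map_nil, List.sum_nil]
    rw [pvComp_zero_of_lt (by omega) (by simp at hn; omega)]
  | succ n ih =>
    intro t k hk hn
    rw [List.range_succ_eq_map]
    simp only [List.map_cons, List.map_map, List.sum_cons]
    have h2 : ((List.range n).map ((fun (i : Nat) => pvComp (t - 1 - (i : Int)) k) ∘ Nat.succ)).sum
        = ((List.range n).map (fun (i : Nat) => pvComp (t - 1 - 1 - (i : Int)) k)).sum := by
      congr 1
      apply List.map_congr_left
      intro i _
      simp only [Function.comp]
      congr 1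
      push_cast
      ring
    rw [h2, ih (t - 1) k hk (by push_cast at hn ⊢; omega)]
    simpa using pvComp_pascal t k hk

-- singles of a composition, as computed in port A
def pvSingles (pos : List Int) : Int := ((pos.filter (fun v => v == 1)).length : Int)

theorem pvSingles_nil : pvSingles [] = 0 := rfl

theorem pvSingles_cons (a : Int) (l : List Int) :
    pvSingles (a :: l) = (if a = 1 then 1 else 0) + pvSingles l := by
  unfold pvSingles
  by_cases h : a = 1 <;> simp [List.filter_cons, h] <;> push_cast <;> ring

-- sum of a function over a flatMap (local helper; sums stay in Int)
theorem pvSumFlatMap {α β : Type} (l : List α) (f : α → List β) (g : β → Int) :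
    ((l.flatMap f).map g).sum = (l.map (fun a => ((f a).map g).sum)).sum := by
  induction l with
  | nil => simp
  | cons a l ih => simp [ih]

theorem pvLenFlatMap {α β : Type} (l : List α) (f : α → List β) :
    (((l.flatMap f).length : Nat) : Int) = (l.map (fun a => ((f a).length : Int))).sum := by
  induction l with
  | nil => simp
  | cons a l ih =>
    simp only [List.flatMap_cons, List.length_append, List.map_cons, List.sum_cons]
    push_cast
    rw [ih]

theorem pc_one (t : Int) : positive_compositions t 1 = if t > 0 then [[t]] else [] := rfl

theorem pc_succ (t : Int) (m : Nat) :
    positive_compositions t (m + 2) =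
      (PySem.List.pyRange 1 (t - ((m : Int) + 2) + 2) 1).flatMap (fun first =>
        (positive_compositions (t - first) (m + 1)).map (fun rest => first :: rest)) := rfl

-- the number of compositions A's generator yields, and their total count of parts = 1
theorem pc_stats : ∀ (k : Nat), 1 ≤ k → ∀ (t : Int),
    ((positive_compositions t k).length : Int) = pvComp t (k : Int) ∧
    ((positive_compositions t k).map pvSingles).sum = (k : Int) * pvComp (t - 1) ((k : Int) - 1) := by
  intro k
  induction k with
  | zero => intro h; exact absurd h (by omega)
  | succ k ih =>
    intro _ t
    rcases k with _ | m
    · -- parts = 1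
      constructor
      · rw [pc_one]
        push_cast
        rw [pvComp_one]
        split_ifs <;> simp_all <;> omega
      · rw [pc_one]
        push_cast
        by_cases ht : t > 0
        · simp only [if_pos ht, List.map_cons, List.map_nil, List.sum_cons, List.sum_nil,
            pvSingles_cons, pvSingles_nil]
          rw [pvComp_zero_right]
          split_ifs <;> simp_all <;> omega
        · simp only [if_neg ht, List.map_nil, List.sum_nil]
          rw [pvComp_zero_right]
          split_ifs <;> omega
    · -- parts = m + 2, inner recursion on m + 1 parts
      have ihk := ih (by omega)
      have hcov : t - ((m : Int) + 1) ≤ (((t - ((m : Int) + 1)).toNat : Nat) : Int) :=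
        Int.self_le_toNat _
      have hrange : PySem.List.pyRange 1 (t - ((m : Int) + 2) + 2) 1
          = (List.range (t - ((m : Int) + 1)).toNat).map (fun (i : Nat) => 1 + (i : Int)) := by
        rw [PySem.List.pyRange_one,
          show (t - ((m : Int) + 2) + 2 - 1).toNat = (t - ((m : Int) + 1)).toNat from by omega]
      constructor
      · rw [pc_succ, hrange, pvLenFlatMap, List.map_map]
        have hcg : ((List.range (t - ((m : Int) + 1)).toNat).map ((fun first =>
              (((positive_compositions (t - first) (m + 1)).map (fun rest => first :: rest)).length : Int))
              ∘ (fun (i : Nat) => 1 + (i : Int)))).sum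
            = ((List.range (t - ((m : Int) + 1)).toNat).map
                (fun (i : Nat) => pvComp (t - 1 - (i : Int)) ((m : Int) + 1))).sum := by
          congr 1
          apply List.map_congr_left
          intro i _
          simp only [Function.comp, List.length_map]
          rw [(ihk (t - (1 + (i : Int)))).1]
          have e : t - (1 + (i : Int)) = t - 1 - (i : Int) := by ring
          rw [e]
          push_cast
          ring_nf
        rw [hcg, pvComp_hs _ t ((m : Int) + 1) (by omega) hcov]
        push_cast
        ring_nf
      · rw [pc_succ, hrange, pvSumFlatMap, List.map_map]
        have hterm : ((List.range (t - ((m : Int) + 1)).toNat).map ((fun first =>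
              (((positive_compositions (t - first) (m + 1)).map (fun rest => first :: rest)).map pvSingles).sum)
              ∘ (fun (i : Nat) => 1 + (i : Int)))).sum
            = ((List.range (t - ((m : Int) + 1)).toNat).map (fun (i : Nat) =>
                (if (1 : Int) + (i : Int) = 1 then 1 else 0) * pvComp (t - 1 - (i : Int)) ((m : Int) + 1)
                + ((m : Int) + 1) * pvComp (t - 1 - (i : Int) - 1) (m : Int))).sum := by
          congr 1
          apply List.map_congr_left
          intro i _
          simp only [Function.comp, List.map_map]
          have hmap : ((positive_compositions (t - (1 + (i : Int))) (m + 1)).map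
                (pvSingles ∘ (fun rest => (1 + (i : Int)) :: rest)))
              = ((positive_compositions (t - (1 + (i : Int))) (m + 1)).map
                (fun rest => (if (1 : Int) + (i : Int) = 1 then 1 else 0) + pvSingles rest)) := by
            apply List.map_congr_left
            intro rest _
            simp only [Function.comp]
            rw [pvSingles_cons]
          rw [hmap, PySem.List.sum_map_add_int, PySem.List.sum_map_const_int,
            (ihk (t - (1 + (i : Int)))).1, (ihk (t - (1 + (i : Int)))).2]
          have e : t - (1 + (i : Int)) = t - 1 - (i : Int) := by ring
          rw [e]
          push_cast
          ring
        rw [hterm, PySem.List.sum_map_add_int]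
        have hmul : ((List.range (t - ((m : Int) + 1)).toNat).map (fun (i : Nat) =>
              ((m : Int) + 1) * pvComp (t - 1 - (i : Int) - 1) (m : Int))).sum
            = ((m : Int) + 1) * pvComp (t - 1) ((m : Int) + 1) := by
          rw [PySem.List.sum_map_const_mul_int (List.range (t - ((m : Int) + 1)).toNat) ((m : Int) + 1)
              (fun (i : Nat) => pvComp (t - 1 - (i : Int) - 1) (m : Int))]
          have hcg2 : ((List.range (t - ((m : Int) + 1)).toNat).map
                (fun (i : Nat) => pvComp (t - 1 - (i : Int) - 1) (m : Int))).sum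
              = ((List.range (t - ((m : Int) + 1)).toNat).map
                (fun (i : Nat) => pvComp (t - 1 - 1 - (i : Int)) (m : Int))).sum := by
            congr 1
            apply List.map_congr_left
            intro i _
            congr 1
            ring
          rw [hcg2, pvComp_hs _ (t - 1) (m : Int) (by omega) (by omega)]
        have hif : ((List.range (t - ((m : Int) + 1)).toNat).map (fun (i : Nat) =>
              (if (1 : Int) + (i : Int) = 1 then 1 else 0) * pvComp (t - 1 - (i : Int)) ((m : Int) + 1))).sum
            = pvComp (t - 1) ((m : Int) + 1) := by
          rcases Nat.eq_zero_or_pos (t - ((m : Int) + 1)).toNat with h0 | hpos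
          · rw [h0]
            simp only [List.range_zero, List.map_nil, List.sum_nil]
            rw [pvComp_zero_of_lt (by omega) (by omega)]
          · obtain ⟨n', hn'⟩ : ∃ n', (t - ((m : Int) + 1)).toNat = n' + 1 :=
              ⟨(t - ((m : Int) + 1)).toNat - 1, by omega⟩
            rw [hn', List.range_succ_eq_map]
            simp only [List.map_cons, List.map_map, List.sum_cons]
            have htail : ((List.range n').map ((fun (i : Nat) =>
                  (if (1 : Int) + (i : Int) = 1 then 1 else 0) * pvComp (t - 1 - (i : Int)) ((m : Int) + 1))
                  ∘ Nat.succ)).sum = 0 := by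
              apply List.sum_eq_zero
              intro x hx
              simp only [List.mem_map] at hx
              obtain ⟨i, _, rfl⟩ := hx
              simp only [Function.comp]
              have hne : ¬((1 : Int) + ((i.succ : Nat) : Int) = 1) := by push_cast; omega
              rw [if_neg hne, zero_mul]
            rw [htail]
            norm_num
        rw [hmul, hif]
        push_cast
        ring

-- A's inner loop over compositions equals B's closed binomial formula
theorem per_support_eq (s Q : Int) (hs1 : 1 ≤ s) :
    (positive_compositions Q s.toNat).foldl (fun per positive =>
        per + s * s - ((positive.filter (fun v => v == 1)).length : Int) + 1) 0
    = (s * s + 1) * pvComp Q s - s * pvComp (Q - 1) (s - 1) := by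
  have hcast : ((s.toNat : Nat) : Int) = s := Int.toNat_of_nonneg (by omega)
  obtain ⟨stats1, stats2⟩ := pc_stats s.toNat (by omega) Q
  rw [hcast] at stats1 stats2
  have h1 : (positive_compositions Q s.toNat).foldl (fun per positive =>
        per + s * s - ((positive.filter (fun v => v == 1)).length : Int) + 1) 0
      = (positive_compositions Q s.toNat).foldl (fun per positive =>
        per + ((s * s + 1) + (-1) * pvSingles positive)) 0 := by
    apply PySem.List.foldl_congr_mem
    intro acc x _
    unfold pvSingles
    ring
  rw [h1, PySem.List.foldl_add, PySem.List.sum_map_add_int, PySem.List.sum_map_const_int,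
    PySem.List.sum_map_const_mul_int, stats1, stats2]
  ring

-- ===== VERDICT (by name: the statement is the Claim_ definition above) =====
theorem exact_matrix_nnz_spec : Claim_equal_exact_matrix_nnz := by
  intro alphabet_size Q _
  unfold Spec_exact_matrix_nnz exact_matrix_nnz exact_matrix_nnz_alt
  apply PySem.List.foldl_congr_mem
  intro acc x hx
  have hx1 : 1 ≤ x := (PySem.List.mem_pyRange_one.mp hx).1
  show acc + (pvComb alphabet_size.toNat x.toNat : Int) *
      ((positive_compositions Q x.toNat).foldl (fun per positive =>
        per + x * x - ((positive.filter (fun v => v == 1)).length : Int) + 1) 0) = _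
  rw [per_support_eq x Q hx1]
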